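-- pv_equiv track=rewrite | github.com/joshuamnewberry/Joshua_Program_Database | School/MTH 225/CodingAssignment3.py | surjective
-- ===== SOURCE A (Python) =====
-- def surjective(f:dict, C:list) -> bool:
--     # Create a temporary list from the input list
--     lst = list(C.copy())
--     # For the values in f, if the output is in the list of codomain, remove it from the list
--     for i in f:
--         # If in the value of f is in lst remove it
--         if f[i] in lst:
--             lst.remove(f[i])
--     # After exiting the loop, if the list is empty return True
--     if lst == []:
--         return True
--     # Otherwise return False
--     return False
-- ===== SOURCE B (Python) =====
-- def surjective(f: dict, C: list) -> bool:
--     # Frequency table of the images of f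
--     img = {}
--     for v in f.values():
--         img[v] = img.get(v, 0) + 1
--     # Frequency table of the codomain list
--     cod = {}
--     for v in C:
--         cod[v] = cod.get(v, 0) + 1
--     # Surjective (onto the multiset C) iff every codomain value has
--     # at least as many preimages as its multiplicity in C
--     return all(img.get(v, 0) >= n for v, n in cod.items())
-- ===== Notes on version B (the rewrite author's own statement) =====
-- stated objective: alternative
-- what changed: Replaces A's destructive loop (copy C, remove one occurrence per image value, test emptiness) by building two frequency tables (images and codomain) and comparing them in one pass per table.
import Mathlib
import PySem

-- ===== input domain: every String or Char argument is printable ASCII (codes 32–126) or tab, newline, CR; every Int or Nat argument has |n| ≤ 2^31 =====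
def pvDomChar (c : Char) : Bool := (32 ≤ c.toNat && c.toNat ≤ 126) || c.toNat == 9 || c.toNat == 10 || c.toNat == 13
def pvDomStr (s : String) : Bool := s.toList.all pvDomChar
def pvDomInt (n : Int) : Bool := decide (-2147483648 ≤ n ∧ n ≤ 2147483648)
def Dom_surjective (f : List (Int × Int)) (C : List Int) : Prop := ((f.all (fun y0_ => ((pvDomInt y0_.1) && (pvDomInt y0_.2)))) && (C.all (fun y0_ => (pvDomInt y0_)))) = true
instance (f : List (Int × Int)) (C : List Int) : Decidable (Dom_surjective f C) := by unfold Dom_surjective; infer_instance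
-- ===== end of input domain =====

-- B replaces A's destructive remove-loop over a copy of C by two frequency tables compared in one pass (alternative decomposition).

-- ===== PORT A =====
-- lst = C.copy(); for i in f: if f[i] in lst: lst.remove(f[i]); return lst == []
def surjective (f : List (Int × Int)) (C : List Int) : Bool :=
  let d := PySem.Dict.ofList f
  let lst := d.keys.foldl (fun lst i =>
    let v := d.getD i 0
    if v ∈ lst then (PySem.List.remove? lst v).getD lst else lst) C
  lst == ([] : List Int)

-- ===== PORT B =====
def surjective_alt (f : List (Int × Int)) (C : List Int) : Bool :=
  let img := (PySem.Dict.ofList f).values.foldl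
    (fun d v => d.insert v (d.getD v 0 + 1)) (PySem.Dict.empty : PySem.Dict Int Int)
  let cod := C.foldl (fun d v => d.insert v (d.getD v 0 + 1)) (PySem.Dict.empty : PySem.Dict Int Int)
  cod.items.all (fun p => decide (p.2 ≤ img.getD p.1 0))

-- ===== PRECONDITION & SPEC =====
def Spec_surjective (f : List (Int × Int)) (C : List Int) (out : Bool) : Prop := out = surjective_alt f C
instance (f : List (Int × Int)) (C : List Int) (out : Bool) : Decidable (Spec_surjective f C out) := by unfold Spec_surjective; infer_instance

-- ===== CLAIM (what is proved, stated in full; the proofs are below) =====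
def Claim_equal_surjective : Prop := ∀ (f : List (Int × Int)) (C : List Int), Dom_surjective f C → Spec_surjective f C (surjective f C)

-- ===== LEMMAS AND PROOFS =====

-- A's loop body: removing a present element is List.erase
theorem surjStep_eq_erase (lst : List Int) (v : Int) :
    (if v ∈ lst then (PySem.List.remove? lst v).getD lst else lst)
      = (if v ∈ lst then lst.erase v else lst) := by
  by_cases h : v ∈ lst
  · simp [PySem.List.remove?_eq_some_erase lst v h, h]
  · simp [h]

-- count after A's fold: Nat-truncated subtraction of the removal multiset
theorem count_fold_erase (vs : List Int) (C : List Int) (x : Int) :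
    (vs.foldl (fun lst v => if v ∈ lst then lst.erase v else lst) C).count x
      = C.count x - vs.count x := by
  induction vs generalizing C with
  | nil => simp
  | cons v vs ih =>
    simp only [List.foldl_cons, ih]
    by_cases hv : v ∈ C
    · by_cases hx : v = x
      · subst hx
        simp [hv, List.count_erase_self]
        omega
      · rw [if_pos hv, List.count_erase_of_ne (fun h => hx h.symm)]
        simp [hx]
    · have h0 : C.count v = 0 := List.count_eq_zero.mpr hv
      by_cases hx : v = x
      · subst hx
        simp [hv, h0]
      · simp [hv, hx]

theorem fold_nil_iff (vs : List Int) (C : List Int) :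
    (vs.foldl (fun lst v => if v ∈ lst then lst.erase v else lst) C) = []
      ↔ ∀ x ∈ C, C.count x ≤ vs.count x := by
  constructor
  · intro h x hx
    have := count_fold_erase vs C x
    rw [h] at this
    simp at this
    omega
  · intro h
    apply List.eq_nil_iff_forall_not_mem.mpr
    intro x hx
    rw [← List.count_pos_iff, count_fold_erase vs C x] at hx
    by_cases hm : x ∈ C
    · have := h x hm; omega
    · have : C.count x = 0 := List.count_eq_zero.mpr hm
      omega

-- ===== VERDICT (by name: the statement is the Claim_ definition above) =====
theorem surjective_spec : Claim_equal_surjective := by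
  intro f C _
  unfold Spec_surjective surjective surjective_alt
  have hnd : (PySem.Dict.ofList f).keys.Nodup := PySem.Dict.nodup_keys_ofList f
  -- A's fold over keys + getD is a fold over the dict's values
  have hA :
      (PySem.Dict.ofList f).keys.foldl (fun lst i =>
          let v := (PySem.Dict.ofList f).getD i 0
          if v ∈ lst then (PySem.List.remove? lst v).getD lst else lst) C
        = (PySem.Dict.ofList f).values.foldl
            (fun lst v => if v ∈ lst then lst.erase v else lst) C := by
    rw [PySem.Dict.values_eq_map_keys _ hnd 0, List.foldl_map]
    congr 1
    funext lst i
    exact surjStep_eq_erase lst _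
  simp only [hA]
  set vs := (PySem.Dict.ofList f).values with hvs
  rw [PySem.Dict.foldl_insert_getD_add_one_eq_counter,
    PySem.Dict.foldl_insert_getD_add_one_eq_counter]
  rw [Bool.eq_iff_iff]
  rw [beq_iff_eq, fold_nil_iff]
  rw [List.all_eq_true]
  simp only [PySem.Dict.items_counter, List.mem_map, PySem.Set.mem_ofList]
  constructor
  · rintro h p ⟨x, hx, rfl⟩
    simp only [PySem.Dict.getD_counter, decide_eq_true_eq]
    exact_mod_cast h x hx
  · intro h x hx
    have := h (x, (C.count x : Int)) ⟨x, hx, rfl⟩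
    simp only [PySem.Dict.getD_counter, decide_eq_true_eq] at this
    exact_mod_cast this
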